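-- pv_equiv track=rewrite | github.com/Dev-debasish-09/Data_Science_Coding | Mayntra/maxTotalPower.py | maxTotalPower
-- ===== SOURCE A (Python) =====
-- def maxTotalPower(N, X):
--     # Current total power (1-based indexing)
--     current_total = 0
--     for i in range(N):
--         current_total += (i + 1) * X[i]
--
--     max_change = 0
--
--     # Try moving each panel p to each position q
--     for p in range(1, N + 1):  # p is 1-based index
--         for q in range(1, N + 1):
--             if p == q:
--                 continue
--
--             if q > p:
--                 # sum from X[p] to X[q-1] in 0-based
--                 total_sum = sum(X[p:q])  # 0-based: index p to q-1
--                 change = (q - p) * X[p-1] - total_sum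
--             else:  # q < p
--                 # sum from X[q-1] to X[p-2] in 0-based
--                 total_sum = sum(X[q-1:p-1])  # 0-based: index q-1 to p-2
--                 change = (q - p) * X[p-1] + total_sum
--
--             if change > max_change:
--                 max_change = change
--
--     return current_total + max_change
-- ===== SOURCE B (Python) =====
-- def maxTotalPower(N, X):
--     # Prefix sums give every contiguous segment sum in O(1), so the whole
--     # search is O(N^2) instead of A's O(N^3).
--     prefix = [0]
--     total = 0
--     for i in range(N):
--         prefix.append(prefix[-1] + X[i])
--         total += (i + 1) * X[i]
--     best = 0
--     for p in range(1, N + 1):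
--         xp = X[p - 1]
--         for q in range(1, N + 1):
--             if q > p:
--                 change = (q - p) * xp - (prefix[q] - prefix[p])
--             elif q < p:
--                 change = (q - p) * xp + (prefix[p - 1] - prefix[q - 1])
--             else:
--                 continue
--             if change > best:
--                 best = change
--     return total + best
-- ===== Notes on version B (the rewrite author's own statement) =====
-- stated objective: faster
-- what changed: B precomputes a prefix-sum array once, replacing A's O(N) slice-sum inside the double loop by an O(1) difference of two prefix entries.
import Mathlib
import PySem

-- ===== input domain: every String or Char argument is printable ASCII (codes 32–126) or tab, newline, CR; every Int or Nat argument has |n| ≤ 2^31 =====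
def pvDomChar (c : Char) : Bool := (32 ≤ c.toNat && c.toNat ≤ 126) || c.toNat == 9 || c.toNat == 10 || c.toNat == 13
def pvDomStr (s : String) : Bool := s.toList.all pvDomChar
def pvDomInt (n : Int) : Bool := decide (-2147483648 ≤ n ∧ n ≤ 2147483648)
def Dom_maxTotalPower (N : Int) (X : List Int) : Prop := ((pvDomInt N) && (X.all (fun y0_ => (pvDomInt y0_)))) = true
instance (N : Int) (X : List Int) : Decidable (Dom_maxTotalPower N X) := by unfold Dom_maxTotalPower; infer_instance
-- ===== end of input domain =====

-- B replaces A's O(N) slice-sum inside the double loop by an O(1) difference of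
-- precomputed prefix sums (O(N^2) instead of O(N^3)); same return value on Pre_.


-- ===== PORT A =====
def maxTotalPower (N : Int) (X : List Int) : Int :=
  let current_total :=
    (PySem.List.pyRange 0 N).foldl
      (fun acc i => acc + (i + 1) * PySem.List.pyGetD X i 0) 0
  let max_change :=
    (PySem.List.pyRange 1 (N + 1)).foldl (fun mc p =>
      (PySem.List.pyRange 1 (N + 1)).foldl (fun mc q =>
        if p = q then mc
        else
          let change :=
            if q > p then
              (q - p) * PySem.List.pyGetD X (p - 1) 0
                - (PySem.List.slice X (some p) (some q)).sum
            else
              (q - p) * PySem.List.pyGetD X (p - 1) 0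
                + (PySem.List.slice X (some (q - 1)) (some (p - 1))).sum
          if change > mc then change else mc) mc) 0
  current_total + max_change

-- ===== PORT B =====
def maxTotalPower_alt (N : Int) (X : List Int) : Int :=
  let st :=
    (PySem.List.pyRange 0 N).foldl
      (fun (st : List Int × Int) i =>
        (st.1 ++ [PySem.List.pyGetD st.1 (-1) 0 + PySem.List.pyGetD X i 0],
         st.2 + (i + 1) * PySem.List.pyGetD X i 0))
      ([0], 0)
  let best :=
    (PySem.List.pyRange 1 (N + 1)).foldl (fun b p =>
      let xp := PySem.List.pyGetD X (p - 1) 0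
      (PySem.List.pyRange 1 (N + 1)).foldl (fun b q =>
        if q > p then
          let change := (q - p) * xp
            - (PySem.List.pyGetD st.1 q 0 - PySem.List.pyGetD st.1 p 0)
          if change > b then change else b
        else if q < p then
          let change := (q - p) * xp
            + (PySem.List.pyGetD st.1 (p - 1) 0 - PySem.List.pyGetD st.1 (q - 1) 0)
          if change > b then change else b
        else b) b) 0
  st.2 + best

-- ===== PRECONDITION & SPEC =====
-- A raises IndexError (X[i]) as soon as N exceeds len(X); those inputs are excluded.
def Pre_maxTotalPower (N : Int) (X : List Int) : Prop := N ≤ (X.length : Int)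
instance (N : Int) (X : List Int) : Decidable (Pre_maxTotalPower N X) := by
  unfold Pre_maxTotalPower; infer_instance
def pvWitness_maxTotalPower : Int × List Int := (2, [3, 1])

def Spec_maxTotalPower (N : Int) (X : List Int) (out : Int) : Prop := out = maxTotalPower_alt N X
instance (N : Int) (X : List Int) (out : Int) : Decidable (Spec_maxTotalPower N X out) := by unfold Spec_maxTotalPower; infer_instance

-- ===== CLAIM (what is proved, stated in full; the proofs are below) =====
def Claim_equal_maxTotalPower : Prop := ∀ (N : Int) (X : List Int), Dom_maxTotalPower N X → Pre_maxTotalPower N X → Spec_maxTotalPower N X (maxTotalPower N X)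

-- ===== LEMMAS AND PROOFS =====

-- the prefix list B builds: k ↦ sum of the first k elements of X, k = 0..n
def pvPfx (X : List Int) (n : Nat) : List Int :=
  (List.range (n + 1)).map (fun k => (X.take k).sum)

-- B's builder fold: first component is pvPfx, second is A's current_total fold
theorem pvBuild (X : List Int) (n : Nat) (hn : n ≤ X.length) (acc : Int) :
    (List.map (fun (k : Nat) => (k : Int)) (List.range n)).foldl
      (fun (st : List Int × Int) i =>
        (st.1 ++ [PySem.List.pyGetD st.1 (-1) 0 + PySem.List.pyGetD X i 0],
         st.2 + (i + 1) * PySem.List.pyGetD X i 0))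
      ([0], acc)
    = (pvPfx X n,
       (List.map (fun (k : Nat) => (k : Int)) (List.range n)).foldl
         (fun a i => a + (i + 1) * PySem.List.pyGetD X i 0) acc) := by
  induction n generalizing acc with
  | zero => simp [pvPfx]
  | succ m ih =>
    rw [List.range_succ (n := m), List.map_append, List.foldl_append,
        List.foldl_append, ih (by omega)]
    simp only [List.map_cons, List.map_nil, List.foldl_cons, List.foldl_nil]
    have hlast : PySem.List.pyGetD (pvPfx X m) (-1) 0 = (X.take m).sum := by
      simp [pvPfx, PySem.List.pyGetD, PySem.List.pyGet?_neg_one, List.getLast?_map,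
            List.range_succ]
    have hnew : (X.take m).sum + X[m]?.getD 0 = (X.take (m + 1)).sum := by
      rw [List.take_add_one, List.sum_append,
          List.getElem?_eq_getElem (l := X) (i := m) (by omega)]
      simp
    rw [show pvPfx X (m + 1)
          = pvPfx X m ++ [(X.take (m + 1)).sum] by
        simp [pvPfx, List.range_succ (n := m + 1)]]
    simp only [pvPfx] at hlast ⊢
    simp [hlast, hnew]

-- looking up the prefix list
theorem pvPfx_get (X : List Int) (n : Nat) {i : Int} (h0 : 0 ≤ i) (hi : i ≤ (n : Int)) :
    PySem.List.pyGetD (pvPfx X n) i 0 = (X.take i.toNat).sum := by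
  rw [pvPfx, PySem.List.pyGetD_of_nonneg _ _ h0,
      PySem.List.getD_map_range _ _ _ _ (by omega)]

-- sum of a slice is a difference of prefix sums
theorem pvSliceSum (X : List Int) {a b : Int} (h0 : 0 ≤ a) (hab : a ≤ b) :
    (PySem.List.slice X (some a) (some b)).sum
      = (X.take b.toNat).sum - (X.take a.toNat).sum := by
  rw [PySem.List.slice_toNat X h0 (le_trans h0 hab)]
  rw [show (X.take b.toNat) = X.take (a.toNat + (b.toNat - a.toNat)) by congr 1; omega,
      List.take_add, List.sum_append]
  ring

-- ===== VERDICT (by name: the statement is the Claim_ definition above) =====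
theorem maxTotalPower_spec : Claim_equal_maxTotalPower := by
  intro N X _hDom hPre
  unfold Pre_maxTotalPower at hPre
  unfold Spec_maxTotalPower maxTotalPower maxTotalPower_alt
  have hlen : N.toNat ≤ X.length := by omega
  rw [PySem.List.pyRange_one 0 N]
  simp only [Int.sub_zero, zero_add]
  rw [pvBuild X N.toNat hlen 0]
  simp only
  congr 1
  apply PySem.List.foldl_congr_mem
  intro b p hp
  rw [PySem.List.mem_pyRange_one] at hp
  apply PySem.List.foldl_congr_mem
  intro mc q hq
  rw [PySem.List.mem_pyRange_one] at hq
  rcases lt_trichotomy p q with hlt | heq | hgt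
  · -- q > p : A's slice sum = a difference of two prefix entries
    have hc : (PySem.List.slice X (some p) (some q)).sum
        = PySem.List.pyGetD (pvPfx X N.toNat) q 0
          - PySem.List.pyGetD (pvPfx X N.toNat) p 0 := by
      rw [pvSliceSum X (by omega) (le_of_lt hlt),
          pvPfx_get X N.toNat (by omega) (by omega),
          pvPfx_get X N.toNat (by omega) (by omega)]
    simp only [hc, eq_false (show ¬ p = q by omega),
               eq_true (show q > p from hlt), eq_false (show ¬ q < p by omega),
               if_true, if_false]
  · simp [heq]
  · -- q < p : A's slice sum = a difference of two prefix entries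
    have hc : (PySem.List.slice X (some (q - 1)) (some (p - 1))).sum
        = PySem.List.pyGetD (pvPfx X N.toNat) (p - 1) 0
          - PySem.List.pyGetD (pvPfx X N.toNat) (q - 1) 0 := by
      rw [pvSliceSum X (by omega) (by omega),
          pvPfx_get X N.toNat (by omega) (by omega),
          pvPfx_get X N.toNat (by omega) (by omega)]
    simp only [hc, eq_false (show ¬ p = q by omega),
               eq_false (show ¬ q > p by omega), eq_true (show q < p from hgt),
               if_true, if_false]
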